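-- pv_equiv track=rewrite | github.com/XASHA-XII/Euler_Project | problems/p079.py | process_keylogs
-- ===== SOURCE A (Python) =====
-- from typing import List, Dict, Set
--
-- def process_keylogs(keylogs: List[str]) -> Dict[str, Set[str]]:
--     """Returns a dicionary of all the digits in the keylog and the set of numbers that appear after them in any keylog. For example for 312
--     in keylogs we get {3:{12}, 1:{2}, 2:{}}.
--
--     Args:
--         keylogs (List[str]): The keylogs
--
--     Returns:
--         Dict[str, Set[str]]: The dicionary of the digits
--     """
--     digits_in_keylogs = {}
--     for log in keylogs:
--         for k in range(len(log)):
--             if log[k] not in digits_in_keylogs: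
--                 digits_in_keylogs[log[k]] = set()
--             else:
--                 digits_in_keylogs[log[k]] = digits_in_keylogs[log[k]] | (
--                     set(digit for digit in log[k+1:]))
--     return digits_in_keylogs
-- ===== SOURCE B (Python) =====
-- from typing import List, Dict, Set
--
-- def process_keylogs(keylogs: List[str]) -> Dict[str, Set[str]]:
--     """Same mapping: for each log the distinct-suffix lists are precomputed
--     incrementally right-to-left, so no per-position slice-and-rescan is needed."""
--     result = {}
--     for log in keylogs:
--         suf = []    # distinct chars of the part of log to the right, first-occurrence order
--         sufs = []   # sufs[k] = distinct chars of log[k+1:]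
--         for c in reversed(log):
--             sufs.append(suf)
--             suf = [c] + [d for d in suf if d != c]
--         sufs.reverse()
--         for c, s in zip(log, sufs):
--             if c not in result:
--                 result[c] = set()
--             else:
--                 result[c].update(s)
--     return result
-- ===== Notes on version B (the rewrite author's own statement) =====
-- stated objective: alternative
-- what changed: B precomputes each log's distinct-suffix lists incrementally right-to-left (one pass plus a zip pass) instead of re-slicing and re-building set(log[k+1:]) at every position.
import Mathlib
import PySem

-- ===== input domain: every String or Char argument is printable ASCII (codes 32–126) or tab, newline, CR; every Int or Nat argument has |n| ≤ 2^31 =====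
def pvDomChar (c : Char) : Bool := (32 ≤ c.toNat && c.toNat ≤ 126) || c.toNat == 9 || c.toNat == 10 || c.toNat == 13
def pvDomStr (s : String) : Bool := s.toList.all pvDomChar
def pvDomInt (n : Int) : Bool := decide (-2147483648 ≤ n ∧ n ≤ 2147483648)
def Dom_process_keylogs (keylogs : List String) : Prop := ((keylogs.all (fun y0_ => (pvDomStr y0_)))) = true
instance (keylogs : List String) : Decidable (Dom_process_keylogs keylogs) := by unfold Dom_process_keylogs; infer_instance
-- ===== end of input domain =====

-- B replaces A's per-position 'set(log[k+1:])' slice-and-rescan by suffix distinct-char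
-- lists built incrementally right-to-left (a different traversal; timing did not confirm a speed-up).

-- ===== PORT A =====

-- iterating a Python string yields its characters as 1-character strings
def pvChars (log : String) : List String := log.toList.map (fun ch => String.ofList [ch])

-- 'for k in range(len(log)): … log[k] … log[k+1:] …' as structural recursion on the
-- character list: at each step c is log[k] and rest is log[k+1:]
def aLoop (d : PySem.Dict String (PySem.Set String)) :
    List String → PySem.Dict String (PySem.Set String)
  | [] => d
  | c :: rest =>
      let d' := if ¬ d.contains c then d.insert c PySem.Set.empty
                else d.insert c (PySem.Set.union (d.getD c PySem.Set.empty) (PySem.Set.ofList rest))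
      aLoop d' rest

def process_keylogs (keylogs : List String) : List (String × List String) :=
  (keylogs.foldl (fun d log => aLoop d (pvChars log)) PySem.Dict.empty).items

-- ===== PORT B =====

-- the reversed pass of Source B: returns (suf, sufs) = (distinct chars of cs in
-- first-occurrence order, the list with sufs[k] = distinct chars of cs[k+1:])
def bSufs : List String → List String × List (List String)
  | [] => ([], [])
  | c :: rest =>
      let (suf, sufs) := bSufs rest
      (c :: suf.filter (fun dg => dg != c), suf :: sufs)

-- 'for c, s in zip(log, sufs): …'
def bLoop (d : PySem.Dict String (PySem.Set String)) :
    List (String × List String) → PySem.Dict String (PySem.Set String)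
  | [] => d
  | (c, s) :: t =>
      let d' := if ¬ d.contains c then d.insert c PySem.Set.empty
                else d.insert c (PySem.Set.update (d.getD c PySem.Set.empty) s)
      bLoop d' t

def process_keylogs_alt (keylogs : List String) : List (String × List String) :=
  (keylogs.foldl
    (fun d log => bLoop d (List.zip (pvChars log) (bSufs (pvChars log)).2))
    PySem.Dict.empty).items

-- ===== PRECONDITION & SPEC =====
def Spec_process_keylogs (keylogs : List String) (out : List (String × List String)) : Prop := out = process_keylogs_alt keylogs
instance (keylogs : List String) (out : List (String × List String)) : Decidable (Spec_process_keylogs keylogs out) := by unfold Spec_process_keylogs; infer_instance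

-- ===== CLAIM (what is proved, stated in full; the proofs are below) =====
def Claim_equal_process_keylogs : Prop := ∀ (keylogs : List String), Dom_process_keylogs keylogs → Spec_process_keylogs keylogs (process_keylogs keylogs)

-- ===== LEMMAS AND PROOFS =====

-- B's incremental suffix accumulator is exactly set(cs) in first-insertion order
theorem bSufs_fst (cs : List String) : (bSufs cs).1 = PySem.Set.ofList cs := by
  induction cs with
  | nil => simp [bSufs, PySem.Set.ofList]
  | cons c rest ih =>
      rw [PySem.Set.ofList_cons]
      simp only [bSufs, ih, PySem.Set.discard]
      congr 1

theorem bLoop_eq_aLoop (cs : List String) :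
    ∀ d, bLoop d (List.zip cs (bSufs cs).2) = aLoop d cs := by
  induction cs with
  | nil => intro d; rfl
  | cons c rest ih =>
      intro d
      show bLoop d (List.zip (c :: rest) ((bSufs rest).1 :: (bSufs rest).2)) = _
      simp only [List.zip_cons_cons, bLoop, aLoop, bSufs_fst, PySem.Set.union, ih]

theorem foldl_bLoop_eq (ks : List String) :
    ∀ d, ks.foldl (fun d log => bLoop d (List.zip (pvChars log) (bSufs (pvChars log)).2)) d
      = ks.foldl (fun d log => aLoop d (pvChars log)) d := by
  induction ks with
  | nil => intro d; rfl
  | cons log t ih => intro d; rw [List.foldl_cons, List.foldl_cons, bLoop_eq_aLoop]; exact ih _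

-- ===== VERDICT (by name: the statement is the Claim_ definition above) =====
theorem process_keylogs_spec : Claim_equal_process_keylogs := by
  intro keylogs _
  unfold Spec_process_keylogs process_keylogs process_keylogs_alt
  rw [foldl_bLoop_eq]
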